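-- pv_equiv track=rewrite | github.com/wxnacy/wush | wapi/common/utils.py | search
-- ===== SOURCE A (Python) =====
-- def search(datas, word):
--     """搜索"""
--     patten = {}
--     for o in datas:
--         patten[o] = 0
--         p = o.lower()
--         if word not in p:
--             continue
--         patten[o] += 1
--         if p.startswith(word):
--             patten[o] += 1
--     datas = list(filter(lambda x: patten[x] > 0, datas))
--     datas.sort(key = lambda x: patten[x], reverse=True)
--     return datas
-- ===== SOURCE B (Python) =====
-- def search(datas, word):
--     """搜索"""
--     prefix_hits = []
--     substr_hits = []
--     for o in datas:
--         p = o.lower()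
--         if p.startswith(word):
--             prefix_hits.append(o)
--         elif word in p:
--             substr_hits.append(o)
--     return prefix_hits + substr_hits
-- ===== Notes on version B (the rewrite author's own statement) =====
-- stated objective: simpler
-- what changed: Replaces A's score-dict + filter + stable descending comparison sort with a single pass that appends each string to one of two buckets (prefix matches, then other substring matches) and concatenates them.
import Mathlib
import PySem

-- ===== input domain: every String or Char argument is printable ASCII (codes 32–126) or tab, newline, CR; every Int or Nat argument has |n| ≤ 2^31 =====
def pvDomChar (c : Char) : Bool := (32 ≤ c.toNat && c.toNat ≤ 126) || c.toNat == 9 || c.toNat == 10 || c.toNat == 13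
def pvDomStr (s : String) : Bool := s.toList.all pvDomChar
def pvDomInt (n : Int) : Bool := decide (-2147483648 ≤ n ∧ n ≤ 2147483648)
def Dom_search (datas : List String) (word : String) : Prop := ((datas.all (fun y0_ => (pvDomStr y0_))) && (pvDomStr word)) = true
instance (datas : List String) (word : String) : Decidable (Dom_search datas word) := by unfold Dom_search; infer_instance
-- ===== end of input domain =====

-- B replaces A's dict-of-scores + filter + stable descending sort by a single pass that
-- appends each match to one of two buckets (prefix matches, then other substring matches).

-- ===== PORT A =====
def search (datas : List String) (word : String) : List String :=
  let patten : PySem.Dict String Int :=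
    datas.foldl (fun d o =>
      let d := d.insert o 0
      let p := PySem.Str.lower o
      if ¬ (PySem.Str.isIn word p) then d
      else
        let d := d.modify o 0 (· + 1)
        if PySem.Str.startswith p word then d.modify o 0 (· + 1) else d)
      PySem.Dict.empty
  let datas2 := datas.filter (fun x => patten.getD x 0 > 0)
  PySem.List.sorted datas2 (fun x => patten.getD x 0) true

-- ===== PORT B =====
def search_alt (datas : List String) (word : String) : List String :=
  let st := datas.foldl (fun (acc : List String × List String) o =>
      let p := PySem.Str.lower o
      if PySem.Str.startswith p word then (acc.1 ++ [o], acc.2)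
      else if PySem.Str.isIn word p then (acc.1, acc.2 ++ [o])
      else acc)
    ([], [])
  st.1 ++ st.2

-- ===== PRECONDITION & SPEC =====
def Spec_search (datas : List String) (word : String) (out : List String) : Prop := out = search_alt datas word
instance (datas : List String) (word : String) (out : List String) : Decidable (Spec_search datas word out) := by unfold Spec_search; infer_instance

-- ===== CLAIM (what is proved, stated in full; the proofs are below) =====
def Claim_equal_search : Prop := ∀ (datas : List String) (word : String), Dom_search datas word → Spec_search datas word (search datas word)

-- ===== LEMMAS AND PROOFS =====

-- the two tests, and the score A's dict ends up holding for a string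
def pvSw (word o : String) : Bool := PySem.Str.startswith (PySem.Str.lower o) word
def pvIn (word o : String) : Bool := PySem.Str.isIn word (PySem.Str.lower o)
def pvScore (word o : String) : Int :=
  if pvIn word o then (if pvSw word o then 2 else 1) else 0

theorem pvSw_imp_pvIn (word o : String) (h : pvSw word o = true) : pvIn word o = true := by
  unfold pvSw at h
  unfold pvIn
  rw [PySem.Str.isIn_iff_infix]
  unfold PySem.Str.startswith PySem.Chars.startswith at h
  exact (List.IsPrefix.isInfix (List.isPrefixOf_iff_prefix.mp h))

-- A's loop body
def pvStepA (word : String) (d : PySem.Dict String Int) (o : String) : PySem.Dict String Int :=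
  let d := d.insert o 0
  let p := PySem.Str.lower o
  if ¬ (PySem.Str.isIn word p) then d
  else
    let d := d.modify o 0 (· + 1)
    if PySem.Str.startswith p word then d.modify o 0 (· + 1) else d

theorem pvStepA_getD (word : String) (d : PySem.Dict String Int) (o x : String) :
    (pvStepA word d o).getD x 0 = if x = o then pvScore word o else d.getD x 0 := by
  unfold pvStepA pvScore pvIn pvSw
  simp only [PySem.Dict.modify]
  by_cases hin : PySem.Str.isIn word (PySem.Str.lower o) = true <;>
    by_cases hsw : PySem.Str.startswith (PySem.Str.lower o) word = true <;>
      simp only [hin, hsw, not_true, not_false_iff, if_true, if_false, Bool.false_eq_true,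
        PySem.Dict.getD_insert] <;> split <;> simp_all

theorem pvFoldA_getD (word : String) (datas : List String) (d : PySem.Dict String Int) (x : String) :
    (datas.foldl (pvStepA word) d).getD x 0 =
      if x ∈ datas then pvScore word x else d.getD x 0 := by
  induction datas generalizing d with
  | nil => simp
  | cons o rest ih =>
    simp only [List.foldl_cons, ih, pvStepA_getD, List.mem_cons]
    by_cases hr : x ∈ rest <;> by_cases ho : x = o <;> simp [hr, ho]

-- insertBy helpers for the two-bucket argument
theorem pvInsertBy_append (before : String → String → Bool) (x : String) (as bs : List String)
    (h : ∀ a ∈ as, before x a = false) :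
    PySem.List.insertBy before x (as ++ bs) = as ++ PySem.List.insertBy before x bs := by
  induction as with
  | nil => simp
  | cons a t ih =>
    simp only [List.cons_append, PySem.List.insertBy, h a (by simp)]
    simp only [Bool.false_eq_true, if_false]
    rw [ih (fun a ha => h a (by simp [ha]))]

theorem pvInsertBy_front (before : String → String → Bool) (x : String) (ys : List String)
    (h : ∀ y ∈ ys, before x y = true) :
    PySem.List.insertBy before x ys = x :: ys := by
  cases ys with
  | nil => rfl
  | cons y t => simp [PySem.List.insertBy, h y (by simp)]

-- stable descending insertion sort over {1,2}-valued keys is bucket concatenation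
theorem pvBucketFold (k : String → Int) (p : String → Bool) (xs : List String)
    (h : ∀ x ∈ xs, k x = if p x then 2 else 1) :
    ∀ A2 A1 : List String, (∀ y ∈ A2, k y = 2) → (∀ y ∈ A1, k y = 1) →
      xs.foldl (fun acc x => PySem.List.insertBy (fun a b => decide (k b < k a)) x acc) (A2 ++ A1)
        = A2 ++ xs.filter p ++ (A1 ++ xs.filter (fun x => !p x)) := by
  induction xs with
  | nil => intro A2 A1 _ _; simp
  | cons x t ih =>
    intro A2 A1 h2 h1
    have hx := h x (by simp)
    have ht : ∀ y ∈ t, k y = if p y then 2 else 1 := fun y hy => h y (by simp [hy])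
    by_cases hp : p x = true
    · have hkx : k x = 2 := by rw [hx, hp]; rfl
      have step : PySem.List.insertBy (fun a b => decide (k b < k a)) x (A2 ++ A1)
          = (A2 ++ [x]) ++ A1 := by
        rw [pvInsertBy_append _ _ _ _ (fun a ha => by simp [h2 a ha, hkx]),
            pvInsertBy_front _ _ _ (fun y hy => by simp [h1 y hy, hkx])]
        simp
      simp only [List.foldl_cons, step]
      rw [ih ht (A2 ++ [x]) A1
        (fun y hy => by rcases List.mem_append.mp hy with hy | hy
                        · exact h2 y hy
                        · simp at hy; subst hy; exact hkx) h1]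
      simp [hp, List.append_assoc]
    · have hkx : k x = 1 := by rw [hx]; simp [hp]
      have step : PySem.List.insertBy (fun a b => decide (k b < k a)) x (A2 ++ A1)
          = A2 ++ (A1 ++ [x]) := by
        rw [← List.append_assoc]
        exact PySem.List.insertBy_of_forall_not_before _ _ _
          (fun y hy => by
            rcases List.mem_append.mp hy with hy | hy
            · simp [h2 y hy, hkx]
            · simp [h1 y hy, hkx])
      simp only [List.foldl_cons, step]
      rw [ih ht A2 (A1 ++ [x]) h2
        (fun y hy => by rcases List.mem_append.mp hy with hy | hy
                        · exact h1 y hy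
                        · simp at hy; subst hy; exact hkx)]
      simp [hp, List.append_assoc]

theorem pvSortedBuckets (k : String → Int) (p : String → Bool) (xs : List String)
    (h : ∀ x ∈ xs, k x = if p x then 2 else 1) :
    PySem.List.sorted xs k true = xs.filter p ++ xs.filter (fun x => !p x) := by
  rw [PySem.List.sorted_rev_eq_foldl_insertBy]
  have := pvBucketFold k p xs h [] [] (by simp) (by simp)
  simpa using this

-- B's loop is the pair of bucket filters
theorem pvAltFold (word : String) (datas : List String) :
    ∀ acc : List String × List String,
      datas.foldl (fun (acc : List String × List String) o =>
        let p := PySem.Str.lower o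
        if PySem.Str.startswith p word then (acc.1 ++ [o], acc.2)
        else if PySem.Str.isIn word p then (acc.1, acc.2 ++ [o])
        else acc) acc
      = (acc.1 ++ datas.filter (pvSw word),
         acc.2 ++ datas.filter (fun o => !pvSw word o && pvIn word o)) := by
  induction datas with
  | nil => intro acc; simp
  | cons o t ih =>
    intro acc
    simp only [List.foldl_cons]
    by_cases hsw : pvSw word o = true
    · rw [show (if PySem.Str.startswith (PySem.Str.lower o) word then (acc.1 ++ [o], acc.2)
            else if PySem.Str.isIn word (PySem.Str.lower o) then (acc.1, acc.2 ++ [o]) else acc)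
          = (acc.1 ++ [o], acc.2) from by simp [pvSw] at hsw; simp [hsw]]
      rw [ih]
      simp [hsw, List.append_assoc]
    · by_cases hin : pvIn word o = true
      · rw [show (if PySem.Str.startswith (PySem.Str.lower o) word then (acc.1 ++ [o], acc.2)
              else if PySem.Str.isIn word (PySem.Str.lower o) then (acc.1, acc.2 ++ [o]) else acc)
            = (acc.1, acc.2 ++ [o]) from by
              simp [pvSw] at hsw; simp [pvIn] at hin; simp [hsw, hin]]
        rw [ih]
        simp [hsw, hin, List.append_assoc]
      · rw [show (if PySem.Str.startswith (PySem.Str.lower o) word then (acc.1 ++ [o], acc.2)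
              else if PySem.Str.isIn word (PySem.Str.lower o) then (acc.1, acc.2 ++ [o]) else acc)
            = acc from by
              simp [pvSw] at hsw; simp [pvIn] at hin; simp [hsw, hin]]
        rw [ih]
        simp [hsw, hin]

-- ===== VERDICT (by name: the statement is the Claim_ definition above) =====
theorem search_spec : Claim_equal_search := by
  intro datas word _
  unfold Spec_search search search_alt
  have hdict : ∀ x ∈ datas,
      (datas.foldl (pvStepA word) PySem.Dict.empty).getD x 0 = pvScore word x := by
    intro x hx
    rw [pvFoldA_getD]
    simp [hx]
  simp only []
  rw [show (fun (d : PySem.Dict String Int) (o : String) =>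
        let d := d.insert o 0
        let p := PySem.Str.lower o
        if ¬ (PySem.Str.isIn word p) then d
        else
          let d := d.modify o 0 (· + 1)
          if PySem.Str.startswith p word then d.modify o 0 (· + 1) else d) = pvStepA word from rfl]
  rw [pvAltFold word datas ([], [])]
  have hfil : datas.filter (fun x => decide ((datas.foldl (pvStepA word) PySem.Dict.empty).getD x 0 > 0))
      = datas.filter (fun x => pvIn word x) := by
    apply List.filter_congr
    intro x hx
    rw [hdict x hx]
    unfold pvScore
    by_cases hin : pvIn word x = true <;> by_cases hsw : pvSw word x = true <;> simp [hin, hsw]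
  rw [hfil]
  rw [pvSortedBuckets _ (pvSw word) _ (by
    intro x hx
    simp only [List.mem_filter] at hx
    rw [hdict x hx.1]
    unfold pvScore
    rw [if_pos hx.2])]
  simp only [List.nil_append, List.filter_filter]
  congr 1
  apply List.filter_congr
  intro x _
  by_cases hsw : pvSw word x = true
  · simp [hsw, pvSw_imp_pvIn word x hsw]
  · simp [hsw]
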